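-- pv_equiv track=rewrite | github.com/Rxdxxn/FunctiileHomework | homework28.py | multipli_3_mici
-- ===== SOURCE A (Python) =====
-- def multipli_3_mici(a,b,c):
--     q=[]
--     if a>b and a>c:
--         mult=a
--     elif b>a and b>c:
--         mult=b
--     else:
--         mult=c
--     while len(q)<3:
--         if ((mult%a==0)and(mult%b==0))and(mult%c==0):
--             q.append(mult)
--             mult +=1
--         else:
--             mult +=1
--     return q
-- ===== SOURCE B (Python) =====
-- def multipli_3_mici(a, b, c):
--     # same starting point as the task: the (tie-broken) largest of the three
--     if a > b and a > c:
--         start = a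
--     elif b > a and b > c:
--         start = b
--     else:
--         start = c
--     # gcd by Euclid's algorithm (no imports in the original module)
--     x, y = abs(a), abs(b)
--     while y:
--         x, y = y, x % y
--     L = abs(a * b) // x
--     x, y = L, abs(c)
--     while y:
--         x, y = y, x % y
--     L = L * abs(c) // x
--     # least multiple of L that is >= start, then two more
--     m0 = -(-start // L) * L
--     return [m0, m0 + L, m0 + 2 * L]
-- ===== Notes on version B (the rewrite author's own statement) =====
-- stated objective: faster
-- what changed: Replaces the unit-step search over consecutive integers by computing the LCM with Euclid's gcd and returning [m0, m0+L, m0+2L] where m0 is the least multiple of L at or above A's starting point.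
import Mathlib
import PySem

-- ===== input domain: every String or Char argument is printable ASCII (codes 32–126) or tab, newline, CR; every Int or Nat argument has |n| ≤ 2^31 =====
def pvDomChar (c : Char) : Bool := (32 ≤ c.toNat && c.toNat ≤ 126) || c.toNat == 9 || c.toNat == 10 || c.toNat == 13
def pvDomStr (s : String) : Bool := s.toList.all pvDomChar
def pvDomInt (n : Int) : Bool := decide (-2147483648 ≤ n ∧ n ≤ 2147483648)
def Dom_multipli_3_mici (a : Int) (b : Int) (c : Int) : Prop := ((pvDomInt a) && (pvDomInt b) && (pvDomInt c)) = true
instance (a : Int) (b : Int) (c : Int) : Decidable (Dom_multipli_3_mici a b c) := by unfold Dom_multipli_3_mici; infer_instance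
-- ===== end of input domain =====

-- B replaces A's unit-step scan (O(lcm) iterations) by Euclid's gcd + a ceiling division: asymptotically faster.

-- ===== PORT A =====
-- the starting value of `mult` (A's if/elif/else)
def multAStart (a b c : Int) : Int :=
  if a > b ∧ a > c then a else if b > a ∧ b > c then b else c

-- A's while-loop; `fuel` is a totality guard only (the proof shows 3·lcm+1 steps always suffice on Pre_)
def multALoop (a b c : Int) : Nat → List Int → Int → List Int
  | 0, q, _ => q
  | fuel+1, q, mult =>
    if q.length < 3 then
      if (PySem.Int.mod mult a = 0 ∧ PySem.Int.mod mult b = 0) ∧ PySem.Int.mod mult c = 0 then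
        multALoop a b c fuel (q ++ [mult]) (mult + 1)
      else
        multALoop a b c fuel q (mult + 1)
    else q

def multipli_3_mici (a : Int) (b : Int) (c : Int) : List Int :=
  multALoop a b c (3 * Int.lcm (Int.lcm a b) c + 1) [] (multAStart a b c)

-- ===== PORT B =====
-- Euclid's gcd loop of Source B (`while y: x, y = y, x % y`), as the obvious recursion
def euclid (x y : Nat) : Nat :=
  if h : y = 0 then x else euclid y (x % y)
termination_by y
decreasing_by exact Nat.mod_lt _ (Nat.pos_of_ne_zero h)

def multipli_3_mici_alt (a : Int) (b : Int) (c : Int) : List Int :=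
  let start := if a > b ∧ a > c then a else if b > a ∧ b > c then b else c
  let g1 := euclid a.natAbs b.natAbs
  let l1 := PySem.Int.floordiv ((a*b).natAbs : Int) (g1 : Int)
  let g2 := euclid l1.natAbs c.natAbs
  let l := PySem.Int.floordiv (l1 * (c.natAbs : Int)) (g2 : Int)
  let m0 := -(PySem.Int.floordiv (-start) l) * l
  [m0, m0 + l, m0 + 2 * l]

-- ===== PRECONDITION & SPEC =====
-- Pre_ excludes exactly the inputs where some argument is 0: there A raises ZeroDivisionError.
def Pre_multipli_3_mici (a : Int) (b : Int) (c : Int) : Prop := a ≠ 0 ∧ b ≠ 0 ∧ c ≠ 0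
instance (a : Int) (b : Int) (c : Int) : Decidable (Pre_multipli_3_mici a b c) := by unfold Pre_multipli_3_mici; infer_instance
def pvWitness_multipli_3_mici : Int × Int × Int := (4, 6, 10)

def Spec_multipli_3_mici (a : Int) (b : Int) (c : Int) (out : List Int) : Prop := out = multipli_3_mici_alt a b c
instance (a : Int) (b : Int) (c : Int) (out : List Int) : Decidable (Spec_multipli_3_mici a b c out) := by unfold Spec_multipli_3_mici; infer_instance

-- ===== CLAIM (what is proved, stated in full; the proofs are below) =====
def Claim_equal_multipli_3_mici : Prop := ∀ (a : Int) (b : Int) (c : Int), Dom_multipli_3_mici a b c → Pre_multipli_3_mici a b c → Spec_multipli_3_mici a b c (multipli_3_mici a b c)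

-- ===== LEMMAS AND PROOFS =====

theorem euclid_eq_gcd (x y : Nat) : euclid x y = Nat.gcd y x := by
  induction y using Nat.strong_induction_on generalizing x with
  | _ y ih =>
    rw [euclid]
    split
    · rename_i h; subst h; simp
    · rename_i h
      rw [ih (x % y) (Nat.mod_lt _ (Nat.pos_of_ne_zero h)) y, ← Nat.gcd_rec]

theorem range_succ_map (m0 : Int) (N k : Nat) :
    (List.range (k+1)).map (fun i : Nat => m0 + (i:Int) * N)
      = m0 :: (List.range k).map (fun i : Nat => (m0 + N) + (i:Int) * N) := by
  rw [List.range_succ_eq_map, List.map_cons, List.map_map]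
  refine congrArg₂ _ (by norm_num) ?_
  refine List.map_congr_left (fun i _ => ?_)
  simp only [Function.comp]
  push_cast
  ring

theorem dvd_between (N : Nat) (hN : 0 < N) (m0 x : Int)
    (hm : (N:Int) ∣ m0) (hx : (N:Int) ∣ x) (h1 : m0 < x) (h2 : x < m0 + N) : False := by
  have hd : (N:Int) ∣ (x - m0) := dvd_sub hx hm
  have := Int.le_of_dvd (by omega) hd
  omega

theorem loop_run (a b c : Int) (N : Nat) (hN : 0 < N)
    (hc : ∀ m : Int, ((PySem.Int.mod m a = 0 ∧ PySem.Int.mod m b = 0) ∧ PySem.Int.mod m c = 0) ↔ (N:Int) ∣ m) :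
    ∀ (fuel : Nat) (q : List Int) (mult m0 : Int),
      (N:Int) ∣ m0 → mult ≤ m0 →
      (∀ x, mult ≤ x → x < m0 → ¬ (N:Int) ∣ x) →
      (q.length < 3 → (fuel:Int) ≥ m0 + ((3 - q.length - 1 : Nat):Int) * N + 1 - mult) →
      multALoop a b c fuel q mult = q ++ (List.range (3 - q.length)).map (fun i : Nat => m0 + (i:Int) * N) := by
  intro fuel
  induction fuel with
  | zero =>
    intro q mult m0 hdvd hle hmin hfuel
    by_cases hlen : q.length < 3
    · exfalso
      have h := hfuel hlen
      have h0 : (0:Int) ≤ ((3 - q.length - 1 : Nat):Int) * N :=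
        mul_nonneg (Int.natCast_nonneg _) (Int.natCast_nonneg _)
      omega
    · have : 3 - q.length = 0 := by omega
      simp [multALoop, this]
  | succ fuel ih =>
    intro q mult m0 hdvd hle hmin hfuel
    by_cases hlen : q.length < 3
    · rw [multALoop, if_pos hlen]
      by_cases hdiv : ((PySem.Int.mod mult a = 0 ∧ PySem.Int.mod mult b = 0) ∧ PySem.Int.mod mult c = 0)
      · rw [if_pos hdiv]
        have hdm : (N:Int) ∣ mult := (hc mult).mp hdiv
        have heq : mult = m0 := by
          rcases lt_or_eq_of_le hle with h | h
          · exact absurd hdm (hmin mult le_rfl h)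
          · exact h
        subst heq
        have hrec := ih (q ++ [mult]) (mult + 1) (mult + N)
          (by exact Dvd.dvd.add hdm ⟨1, by ring⟩)
          (by omega)
          (fun x hx1 hx2 hx3 => dvd_between N hN mult x hdm hx3 (by omega) hx2)
          (by
            intro hlen2
            simp only [List.length_append, List.length_cons, List.length_nil] at hlen2 ⊢
            have hk : (3 - q.length - 1 : Nat) = (3 - (q.length + 1) - 1) + 1 := by omega
            have h := hfuel hlen
            rw [hk] at h
            push_cast at h ⊢
            nlinarith)
        rw [hrec]
        have hk3 : 3 - q.length = (3 - (q ++ [mult]).length) + 1 := by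
          simp only [List.length_append, List.length_cons, List.length_nil]
          omega
        rw [hk3, range_succ_map]
        simp
      · rw [if_neg hdiv]
        have hdm : ¬ (N:Int) ∣ mult := fun h => hdiv ((hc mult).mpr h)
        have hne : mult ≠ m0 := fun h => hdm (h ▸ hdvd)
        apply ih q (mult + 1) m0 hdvd (by omega)
          (fun x hx1 hx2 => hmin x (by omega) hx2)
        intro hlen2
        have h := hfuel hlen
        omega
    · rw [multALoop, if_neg hlen]
      have : 3 - q.length = 0 := by omega
      simp [this]

-- proof-side abbreviations
def lcm3 (a b c : Int) : Nat := Nat.lcm (Nat.lcm a.natAbs b.natAbs) c.natAbs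

def ceil0 (a b c : Int) : Int := -(PySem.Int.floordiv (-(multAStart a b c)) ((lcm3 a b c : Nat) : Int))

theorem lcm_cast_dvd (p q : Nat) (m : Int) :
    ((Nat.lcm p q : Nat) : Int) ∣ m ↔ (p:Int) ∣ m ∧ (q:Int) ∣ m := by
  constructor
  · intro h
    exact ⟨dvd_trans (Int.natCast_dvd_natCast.mpr (Nat.dvd_lcm_left p q)) h,
           dvd_trans (Int.natCast_dvd_natCast.mpr (Nat.dvd_lcm_right p q)) h⟩
  · rintro ⟨h1, h2⟩
    have h := lcm_dvd h1 h2
    rw [← Int.coe_lcm] at h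
    simpa [Int.lcm, Int.natAbs_natCast] using h

theorem alt_eval (a b c : Int) :
    multipli_3_mici_alt a b c =
      [ceil0 a b c * (lcm3 a b c : Int),
       ceil0 a b c * (lcm3 a b c : Int) + (lcm3 a b c : Int),
       ceil0 a b c * (lcm3 a b c : Int) + 2 * (lcm3 a b c : Int)] := by
  simp only [multipli_3_mici_alt, ceil0, lcm3, multAStart, euclid_eq_gcd, Int.natAbs_mul,
    Int.natAbs_natCast, ← Nat.cast_mul, PySem.Int.floordiv_natCast, Nat.gcd_comm, Nat.lcm]

theorem multipli_equal (a b c : Int) (ha : a ≠ 0) (hb : b ≠ 0) (hc : c ≠ 0) :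
    multipli_3_mici a b c = multipli_3_mici_alt a b c := by
  have hN : 0 < lcm3 a b c := by
    have : lcm3 a b c ≠ 0 := by
      unfold lcm3
      exact Nat.lcm_ne_zero (Nat.lcm_ne_zero (Int.natAbs_ne_zero.mpr ha) (Int.natAbs_ne_zero.mpr hb)) (Int.natAbs_ne_zero.mpr hc)
    omega
  have hNpos : (0:Int) < (lcm3 a b c : Int) := by exact_mod_cast hN
  have hcond : ∀ m : Int,
      ((PySem.Int.mod m a = 0 ∧ PySem.Int.mod m b = 0) ∧ PySem.Int.mod m c = 0)
        ↔ ((lcm3 a b c : Nat):Int) ∣ m := by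
    intro m
    rw [PySem.Int.mod_eq_zero_iff_dvd, PySem.Int.mod_eq_zero_iff_dvd, PySem.Int.mod_eq_zero_iff_dvd]
    unfold lcm3
    rw [lcm_cast_dvd, lcm_cast_dvd]
    simp
  have hbr := (PySem.Int.neg_floordiv_neg_eq_iff_of_pos (a := multAStart a b c)
    (b := ((lcm3 a b c : Nat):Int)) hNpos).mp rfl
  set N := lcm3 a b c with hNdef
  set qv := ceil0 a b c with hqdef
  have hbr1 : (qv - 1) * (N:Int) < multAStart a b c := hbr.1
  have hbr2 : multAStart a b c ≤ qv * (N:Int) := hbr.2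
  have hfuel : 3 * Int.lcm (Int.lcm a b) c + 1 = 3 * N + 1 := by
    simp [Int.lcm, Int.natAbs_natCast, hNdef, lcm3]
  have hrun := loop_run a b c N hN hcond (3 * N + 1) [] (multAStart a b c) (qv * (N:Int))
    ⟨qv, mul_comm _ _⟩
    hbr2
    (by
      rintro x hx1 hx2 ⟨t, ht⟩
      have htq : t < qv := by nlinarith
      have : x ≤ (qv - 1) * (N:Int) := by nlinarith
      omega)
    (by
      intro _
      have h22 : ((3 - ([] : List Int).length - 1 : Nat) : Int) = 2 := by norm_num
      rw [h22]
      push_cast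
      nlinarith [hbr1])
  rw [multipli_3_mici, hfuel, hrun, alt_eval]
  norm_num [List.range_succ, ← hNdef, ← hqdef]
-- ===== VERDICT (by name: the statement is the Claim_ definition above) =====
theorem multipli_3_mici_spec : Claim_equal_multipli_3_mici := by
  intro a b c _ hpre
  unfold Spec_multipli_3_mici
  exact multipli_equal a b c hpre.1 hpre.2.1 hpre.2.2
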